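-- pv_equiv track=rewrite | github.com/YichaoYao/hello-world | Test.py | processTag
-- ===== SOURCE A (Python) =====
-- from collections import defaultdict
-- from typing import Iterable, List, TypeVar
--
-- T = TypeVar("T")
--
-- def sortByPriorityList(values: Iterable[T], priority: List[T]) -> List[T]:
--     """
--     Sorts an iterable according to a list of priority items.
--     Usage:
--     >>> sort_by_priority_list(values=[1,2,2,3], priority=[2,3,1])
--     [2, 2, 3, 1]
--     >>> sort_by_priority_list(values=set([1,2,3]), priority=[2,3])
--     [2, 3, 1]
--     """
--     priority_dict = defaultdict(
--         lambda: len(priority), zip(priority, range(len(priority)),),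
--     )
--     priority_getter = priority_dict.__getitem__  # dict.get(key)
--     return sorted(values, key=priority_getter)
--
-- def processTag(tags):
--     output = []
--     priority_list = ["MC", "Land", "U", "G", "B", "R", "W"]
--
--     tags = sortByPriorityList(tags, priority_list)
--     if "0_Verified" not in tags :
--         output.append("Not_Verified")
--     for tag in tags:
--         if tag not in ["0", "1", "2", "3", "4", "5", "5+", "0_Verified"]:
--             if "0_Verified" not in tags :
--                 return tag + "_not_verified"
--             else:
--                 return tag
-- ===== SOURCE B (Python) =====
-- def processTag(tags):
--     tags = list(tags)
--     prio = {"MC": 0, "Land": 1, "U": 2, "G": 3, "B": 4, "R": 5, "W": 6}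
--     known = {"0", "1", "2", "3", "4", "5", "5+", "0_Verified"}
--     best = None  # (priority_key, index, tag) with minimal (key, index)
--     for i, tag in enumerate(tags):
--         if tag in known:
--             continue
--         k = prio.get(tag, 7)
--         if best is None or (k, i) < (best[0], best[1]):
--             best = (k, i, tag)
--     if best is None:
--         return None
--     return best[2] if "0_Verified" in tags else best[2] + "_not_verified"
-- ===== Notes on version B (the rewrite author's own statement) =====
-- stated objective: alternative
-- what changed: Replaces the stable sort-by-priority followed by a scan with a single enumerate pass that keeps the unexpected tag minimizing (priority_key, index), then applies the verified suffix once at the end.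
import Mathlib
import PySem

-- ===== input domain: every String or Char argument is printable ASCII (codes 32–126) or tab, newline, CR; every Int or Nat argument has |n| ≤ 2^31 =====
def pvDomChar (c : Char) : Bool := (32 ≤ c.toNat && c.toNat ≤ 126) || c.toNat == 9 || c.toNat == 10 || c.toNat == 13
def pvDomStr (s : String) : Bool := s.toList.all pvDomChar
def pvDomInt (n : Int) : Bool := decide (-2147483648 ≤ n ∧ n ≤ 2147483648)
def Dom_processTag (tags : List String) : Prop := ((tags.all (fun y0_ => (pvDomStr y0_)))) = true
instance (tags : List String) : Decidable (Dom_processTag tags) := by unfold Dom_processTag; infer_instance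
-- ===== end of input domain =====

-- B replaces A's stable sort-then-scan by a single pass keeping the unexpected tag minimal in (priority_key, index); alternative decomposition, same results.

-- ===== PORT A =====
-- sortByPriorityList: sorted(values, key=defaultdict(lambda: len(priority), zip(priority, range(len(priority)))).__getitem__)
def sortByPriorityList (values : List String) (priority : List String) : List String :=
  let priority_dict := PySem.Dict.ofList (List.zip priority (PySem.List.pyRange 0 (priority.length : Int) 1))
  PySem.List.sorted values (fun v => priority_dict.getD v (priority.length : Int)) false

-- the 'for tag in tags: …' loop of A's processTag (tags2 is the sorted list, consulted for "0_Verified")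
def processTagLoop (tags2 : List String) : List String → Option String
  | [] => none
  | tag :: rest =>
    if (["0", "1", "2", "3", "4", "5", "5+", "0_Verified"]).contains tag then
      processTagLoop tags2 rest
    else if tags2.contains "0_Verified" then some tag
    else some (tag ++ "_not_verified")

def processTag (tags : List String) : Option String :=
  -- the 'output' list A builds is never returned and does not affect the result
  let priority_list := ["MC", "Land", "U", "G", "B", "R", "W"]
  let tags2 := sortByPriorityList tags priority_list
  processTagLoop tags2 tags2

-- ===== PORT B =====
def processTag_alt (tags : List String) : Option String :=
  let prio := PySem.Dict.ofList
    [("MC", (0 : Int)), ("Land", 1), ("U", 2), ("G", 3), ("B", 4), ("R", 5), ("W", 6)]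
  let known := PySem.Set.ofList ["0", "1", "2", "3", "4", "5", "5+", "0_Verified"]
  let best := (PySem.List.enumerate tags 0).foldl
    (fun best p =>
      if PySem.Set.contains known p.2 then best
      else
        let k := prio.getD p.2 7
        match best with
        | none => some (k, p.1, p.2)
        | some (bk, bi, bt) =>
          if k < bk ∨ (k = bk ∧ p.1 < bi) then some (k, p.1, p.2) else some (bk, bi, bt))
    none
  match best with
  | none => none
  | some (_, _, bt) => if tags.contains "0_Verified" then some bt else some (bt ++ "_not_verified")

-- ===== PRECONDITION & SPEC =====
def Spec_processTag (tags : List String) (out : Option String) : Prop := out = processTag_alt tags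
instance (tags : List String) (out : Option String) : Decidable (Spec_processTag tags out) := by unfold Spec_processTag; infer_instance

-- ===== CLAIM (what is proved, stated in full; the proofs are below) =====
def Claim_equal_processTag : Prop := ∀ (tags : List String), Dom_processTag tags → Spec_processTag tags (processTag tags)

-- ===== LEMMAS AND PROOFS =====

-- the common sort key and the "unexpected tag" predicate
def knownL : List String := ["0", "1", "2", "3", "4", "5", "5+", "0_Verified"]

def keyF (t : String) : Int :=
  (PySem.Dict.ofList [("MC", (0:Int)), ("Land", 1), ("U", 2), ("G", 3), ("B", 4), ("R", 5), ("W", 6)]).getD t 7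

def pP (t : String) : Bool := !(knownL.contains t)

-- reference selection: left-to-right, keep the first tag with strictly smaller key
def step (cur : Option String) (x : String) : Option String :=
  if pP x && (match cur with | none => true | some c => decide (keyF x < keyF c)) then some x else cur

-- B's loop body, named (definitionally the lambda in processTag_alt)
def bstepB : Option (Int × Int × String) → Int × String → Option (Int × Int × String) :=
  fun best p =>
    if PySem.Set.contains (PySem.Set.ofList knownL) p.2 then best
    else
      match best with
      | none => some (keyF p.2, p.1, p.2)
      | some (bk, bi, bt) =>
        if keyF p.2 < bk ∨ (keyF p.2 = bk ∧ p.1 < bi) then some (keyF p.2, p.1, p.2)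
        else some (bk, bi, bt)

theorem find?_insertBy (ys : List String)
    (hp : List.Pairwise (fun a b => keyF a ≤ keyF b) ys) (x : String) :
    List.find? pP (PySem.List.insertBy (fun a b => decide (keyF a < keyF b)) x ys)
      = step (List.find? pP ys) x := by
  induction ys with
  | nil =>
    cases hpx : pP x <;> simp [PySem.List.insertBy, step, List.find?, hpx]
  | cons y t ih =>
    rcases List.pairwise_cons.mp hp with ⟨hy, ht⟩
    by_cases hxy : keyF x < keyF y
    · simp only [PySem.List.insertBy, decide_eq_true_eq, if_pos hxy]
      cases hpx : pP x with
      | false =>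
        rw [List.find?_cons_of_neg (by simp [hpx])]
        simp [step, hpx]
      | true =>
        rw [List.find?_cons_of_pos (by simp [hpx])]
        cases h : List.find? pP (y :: t) with
        | none => simp [step, hpx]
        | some y0 =>
          have hy0 : keyF x < keyF y0 := by
            have hmem := List.mem_of_find?_eq_some h
            rcases List.mem_cons.mp hmem with rfl | hmt
            · exact hxy
            · exact lt_of_lt_of_le hxy (hy _ hmt)
          simp [step, hpx, hy0]
    · simp only [PySem.List.insertBy, decide_eq_true_eq, if_neg hxy]
      cases hpy : pP y with
      | false =>
        rw [List.find?_cons_of_neg (by simp [hpy]), List.find?_cons_of_neg (by simp [hpy])]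
        exact ih ht
      | true =>
        rw [List.find?_cons_of_pos (by simp [hpy]), List.find?_cons_of_pos (by simp [hpy])]
        simp [step, hxy]

theorem find?_sorted (xs : List String) :
    List.find? pP (PySem.List.sorted xs keyF false) = xs.foldl step none := by
  induction xs using List.reverseRecOn with
  | nil => rfl
  | append_singleton xs x ih =>
    have h1 : PySem.List.sorted (xs ++ [x]) keyF false
        = PySem.List.insertBy (fun a b => decide (keyF a < keyF b)) x
            (PySem.List.sorted xs keyF false) := by
      rw [PySem.List.sorted_eq_foldl_insertBy, PySem.List.sorted_eq_foldl_insertBy,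
        List.foldl_append]
      rfl
    rw [h1, find?_insertBy _ (PySem.List.sorted_pairwise xs keyF) x, ih, List.foldl_append]
    rfl

theorem processTagLoop_eq (tags2 l : List String) :
    processTagLoop tags2 l
      = (List.find? pP l).map
          (fun t => if tags2.contains "0_Verified" then t else t ++ "_not_verified") := by
  induction l with
  | nil => rfl
  | cons tag rest ih =>
    show (if knownL.contains tag then processTagLoop tags2 rest
          else if tags2.contains "0_Verified" then some tag
          else some (tag ++ "_not_verified")) = _
    cases hk : knownL.contains tag with
    | true =>
      rw [List.find?_cons_of_neg (by simp [pP]; simpa using hk)]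
      simp [ih]
    | false =>
      rw [List.find?_cons_of_pos (by simp [pP]; simpa using hk)]
      cases hv : tags2.contains "0_Verified" <;> simp

theorem foldl_bstepB (xs : List String) (s : Int) (best : Option (Int × Int × String))
    (hinv : ∀ bk bi bt, best = some (bk, bi, bt) → bi < s ∧ bk = keyF bt) :
    Option.map (fun t => t.2.2) ((PySem.List.enumerate xs s).foldl bstepB best)
      = xs.foldl step (Option.map (fun t => t.2.2) best) := by
  induction xs generalizing s best with
  | nil => simp [PySem.List.enumerate_nil]
  | cons x xs ih =>
    rw [PySem.List.enumerate_cons, List.foldl_cons, List.foldl_cons]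
    have hcx : PySem.Set.contains (PySem.Set.ofList knownL) x = knownL.contains x := rfl
    cases hk : knownL.contains x with
    | true =>
      have hb : bstepB best (s, x) = best := by
        simp only [bstepB, hcx, hk]
        simp
      have hs : step (Option.map (fun t => t.2.2) best) x = Option.map (fun t => t.2.2) best := by
        simp only [step, pP, hk]
        simp
      rw [hb, hs]
      refine ih (s + 1) best (fun bk bi bt h => ?_)
      obtain ⟨h1, h2⟩ := hinv bk bi bt h
      exact ⟨by omega, h2⟩
    | false =>
      have hpx : pP x = true := by simp only [pP, hk]; rfl
      cases best with
      | none =>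
        have hb : bstepB none (s, x) = some (keyF x, s, x) := by
          simp only [bstepB, hcx, hk]
          simp
        rw [hb, ih (s + 1) _ (fun bk bi bt h => by
          simp only [Option.some.injEq, Prod.mk.injEq] at h
          obtain ⟨rfl, rfl, rfl⟩ := h
          exact ⟨by omega, rfl⟩)]
        simp [step, hpx]
      | some b =>
        obtain ⟨bk, bi, bt⟩ := b
        obtain ⟨hbi, rfl⟩ := hinv _ _ _ rfl
        have hred : bstepB (some (keyF bt, bi, bt)) (s, x)
            = if keyF x < keyF bt ∨ (keyF x = keyF bt ∧ s < bi) then some (keyF x, s, x)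
              else some (keyF bt, bi, bt) := by
          simp only [bstepB, hcx, hk]
          simp
        by_cases hlt : keyF x < keyF bt
        · have hb : bstepB (some (keyF bt, bi, bt)) (s, x) = some (keyF x, s, x) := by
            rw [hred, if_pos (Or.inl hlt)]
          rw [hb, ih (s + 1) _ (fun bk' bi' bt' h => by
            simp only [Option.some.injEq, Prod.mk.injEq] at h
            obtain ⟨rfl, rfl, rfl⟩ := h
            exact ⟨by omega, rfl⟩)]
          simp [step, hpx, hlt]
        · have hb : bstepB (some (keyF bt, bi, bt)) (s, x) = some (keyF bt, bi, bt) := by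
            rw [hred, if_neg]
            rintro (h | ⟨-, h⟩)
            · exact hlt h
            · omega
          rw [hb, ih (s + 1) _ (fun bk' bi' bt' h => by
            simp only [Option.some.injEq, Prod.mk.injEq] at h
            obtain ⟨rfl, rfl, rfl⟩ := h
            exact ⟨by omega, rfl⟩)]
          simp [step, hlt]

theorem contains_sorted (l : List String) (a : String) :
    (PySem.List.sorted l keyF false).contains a = l.contains a := by
  apply Bool.eq_iff_iff.mpr
  simp [PySem.List.mem_sorted]

-- ===== VERDICT (by name: the statement is the Claim_ definition above) =====
theorem processTag_spec : Claim_equal_processTag := by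
  intro tags _
  unfold Spec_processTag
  have hA : processTag tags
      = processTagLoop (PySem.List.sorted tags keyF false) (PySem.List.sorted tags keyF false) := rfl
  have hB : processTag_alt tags
      = (match (PySem.List.enumerate tags 0).foldl bstepB none with
         | none => none
         | some (_, _, bt) =>
           if tags.contains "0_Verified" then some bt else some (bt ++ "_not_verified")) := rfl
  rw [hA, hB, processTagLoop_eq, find?_sorted, contains_sorted]
  have hg := foldl_bstepB tags 0 none (by simp)
  cases hfold : (PySem.List.enumerate tags 0).foldl bstepB none with
  | none =>
    rw [hfold] at hg
    simp only [Option.map_none] at hg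
    rw [← hg]
    rfl
  | some b =>
    obtain ⟨bk, bi, bt⟩ := b
    rw [hfold] at hg
    simp only [Option.map_some, Option.map_none] at hg
    rw [← hg]
    cases tags.contains "0_Verified" <;> rfl
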